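-- pv_equiv track=rewrite | github.com/allenwind/python-data-structure | datastructure.old/smartx/smartx1.py | re_sorting
-- ===== SOURCE A (Python) =====
-- def re_sorting(array):
--     reverse = False
--     length = len(array)
--     index = 0
--     while index <= length - 1:
--         if not reverse:
--             yield array[length-1]
--             length -= 1
--             reverse = True
--         else:
--             yield array[index]
--             index += 1
--             reverse = False
-- ===== SOURCE B (Python) =====
-- def re_sorting(array):
--     n = len(array)
--     flat = [x for pair in zip(reversed(array), array) for x in pair]
--     yield from flat[:n]
-- ===== Notes on version B (the rewrite author's own statement) =====
-- stated objective: idiomatic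
-- what changed: Replaces the toggle-flag two-pointer while loop with a zip of the reversed and forward list, flattened and truncated to n elements.
import Mathlib
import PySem

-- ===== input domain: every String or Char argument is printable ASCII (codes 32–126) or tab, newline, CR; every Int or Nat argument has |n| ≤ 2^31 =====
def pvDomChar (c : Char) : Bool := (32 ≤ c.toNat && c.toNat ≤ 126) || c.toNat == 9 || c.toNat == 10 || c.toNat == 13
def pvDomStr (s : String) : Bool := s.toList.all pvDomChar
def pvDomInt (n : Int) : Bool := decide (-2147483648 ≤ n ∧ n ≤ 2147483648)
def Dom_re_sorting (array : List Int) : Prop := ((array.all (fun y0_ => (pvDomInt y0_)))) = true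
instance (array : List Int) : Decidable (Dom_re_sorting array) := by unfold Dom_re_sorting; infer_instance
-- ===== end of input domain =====

-- B replaces A's toggle-flag while loop by zipping the reversed and forward list,
-- flattening the pairs and truncating to n elements (idiomatic; generator output compared as a list).

-- ===== PORT A =====
-- state (reverse, length, index) exactly as in A's while loop; on every reachable
-- state the indices are in range, so the '.getD 0' default never fires.
def reSortA (array : List Int) (reverse : Bool) (length index : Int) : List Int :=
  if index ≤ length - 1 then
    if reverse = false then
      (PySem.List.pyGet? array (length - 1)).getD 0 :: reSortA array true (length - 1) index
    else
      (PySem.List.pyGet? array index).getD 0 :: reSortA array false length (index + 1)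
  else []
termination_by (length - index).toNat
decreasing_by all_goals omega

def re_sorting (array : List Int) : List Int :=
  reSortA array false (array.length : Int) 0

-- ===== PORT B =====
def re_sorting_alt (array : List Int) : List Int :=
  let n := array.length
  ((array.reverse.zip array).flatMap (fun p => [p.1, p.2])).take n

-- ===== PRECONDITION & SPEC =====
def Spec_re_sorting (array : List Int) (out : List Int) : Prop := out = re_sorting_alt array
instance (array : List Int) (out : List Int) : Decidable (Spec_re_sorting array out) := by unfold Spec_re_sorting; infer_instance

-- ===== CLAIM (what is proved, stated in full; the proofs are below) =====
def Claim_equal_re_sorting : Prop := ∀ (array : List Int), Dom_re_sorting array → Spec_re_sorting array (re_sorting array)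

-- ===== LEMMAS AND PROOFS =====

-- equation lemmas for A's loop
theorem reSortA_false (array : List Int) (length index : Int) (h : index ≤ length - 1) :
    reSortA array false length index
      = (PySem.List.pyGet? array (length - 1)).getD 0 :: reSortA array true (length - 1) index := by
  rw [reSortA]; simp [h]

theorem reSortA_true (array : List Int) (length index : Int) (h : index ≤ length - 1) :
    reSortA array true length index
      = (PySem.List.pyGet? array index).getD 0 :: reSortA array false length (index + 1) := by
  rw [reSortA]; simp [h]

theorem reSortA_stop (array : List Int) (b : Bool) (length index : Int) (h : ¬ index ≤ length - 1) :
    reSortA array b length index = [] := by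
  rw [reSortA]; simp [h]

-- flatten a list of pairs (the comprehension in B)
def pvF (L : List (Int × Int)) : List Int := L.flatMap (fun p => [p.1, p.2])

-- B's computation applied to any list
def pvG (s : List Int) : List Int := (pvF (s.reverse.zip s)).take s.length

theorem pvF_cons (p : Int × Int) (L : List (Int × Int)) :
    pvF (p :: L) = p.1 :: p.2 :: pvF L := by
  simp [pvF]

theorem pvHeadD (l : List Int) (d : Int) : l.headD d = l.head?.getD d := by
  cases l <;> simp

theorem pvF_take (L : List (Int × Int)) (j : Nat) :
    pvF (L.take j) = (pvF L).take (2 * j) := by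
  induction L generalizing j with
  | nil => simp [pvF]
  | cons p t ih =>
    cases j with
    | zero => simp [pvF]
    | succ j =>
      simp [pvF, List.flatMap_cons] at ih ⊢
      rw [show 2 * (j + 1) = 1 + 1 + 2 * j by ring]
      simp [List.take_add, ih]

theorem zip_take' (A B : List Int) (k : Nat) :
    (A.zip B).take k = (A.take k).zip (B.take k) := by
  simp [List.zip, List.take_zipWith]

-- one double-step of B's computation, for lists of length ≥ 2
theorem pvG_step (s : List Int) (hs : 2 ≤ s.length) :
    pvG s = (s.reverse.headD 0) :: (s.headD 0) :: pvG (s.tail.dropLast) := by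
  obtain ⟨b, t, rfl⟩ : ∃ b t, s = b :: t := by
    cases s with
    | nil => simp at hs
    | cons b t => exact ⟨b, t, rfl⟩
  obtain ⟨c, u, rfl⟩ : ∃ c u, t = c :: u := by
    cases t with
    | nil => simp at hs
    | cons c u => exact ⟨c, u, rfl⟩
  have hrev : (b :: c :: u).reverse
      = (b :: c :: u).getLast (by simp) :: (b :: c :: u).dropLast.reverse := by
    conv_lhs => rw [← List.dropLast_append_getLast (l := b :: c :: u) (by simp)]
    simp
  have hD : (b :: c :: u).dropLast = b :: (c :: u).dropLast := by
    simp [List.dropLast_cons₂]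
  have hlenD : (c :: u).dropLast.length = u.length := by simp
  unfold pvG
  rw [hrev, hD, List.zip_cons_cons, pvF_cons]
  simp only [List.length_cons, List.take_succ_cons, List.headD_cons, List.tail_cons, hlenD]
  have h1 : (pvF ((b :: (c :: u).dropLast).reverse.zip (c :: u))).take u.length
      = ((pvF ((b :: (c :: u).dropLast).reverse.zip (c :: u))).take (2 * u.length)).take u.length := by
    rw [List.take_take]; congr 1; omega
  rw [h1, ← pvF_take, zip_take']
  have h2 : (b :: (c :: u).dropLast).reverse.take u.length = (c :: u).dropLast.reverse := by
    have h2' : (b :: (c :: u).dropLast).reverse.take u.length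
        = (b :: (c :: u).dropLast).reverse.dropLast := by
      rw [List.dropLast_eq_take]; simp
    rw [h2', List.dropLast_reverse, List.tail_cons]
  have h3 : (c :: u).take u.length = (c :: u).dropLast := by
    rw [List.dropLast_eq_take]; congr 1
  rw [h2, h3]

-- A's loop on the slice array[index:length] computes pvG of that slice
theorem pvA_slice (array : List Int) : ∀ (m : Nat), ∀ (i : Nat), i + m ≤ array.length →
    reSortA array false ((i : Int) + (m : Int)) (i : Int) = pvG ((array.drop i).take m) := by
  intro m
  induction m using Nat.strong_induction_on with
  | _ m ih =>
    match m with
    | 0 =>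
      intro i hle
      rw [reSortA_stop _ _ _ _ (by push_cast; omega)]
      simp [pvG, pvF]
    | 1 =>
      intro i hle
      have hi : i < array.length := by omega
      rw [reSortA_false _ _ _ (by push_cast; omega)]
      rw [reSortA_stop _ _ _ _ (by push_cast; omega)]
      rw [show (i : Int) + ((1 : Nat) : Int) - 1 = ((i : Nat) : Int) by push_cast; omega,
        PySem.List.pyGet?_natCast]
      have hs : (array.drop i).take 1 = [array[i]] := by
        simp [List.take_one, List.head?_drop, List.getElem?_eq_getElem hi]
      rw [hs]
      simp [pvG, pvF, List.getElem?_eq_getElem hi]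
    | (k+2) =>
      intro i hle
      have h1 : i + k + 1 < array.length := by omega
      have hi : i < array.length := by omega
      -- two unfoldings of A's loop
      rw [reSortA_false _ _ _ (by push_cast; omega)]
      rw [reSortA_true _ _ _ (by push_cast; omega)]
      rw [show (i : Int) + (((k : Nat) + 2 : Nat) : Int) - 1 = ((i + k + 1 : Nat) : Int) by
        push_cast; omega]
      rw [show ((i : Nat) : Int) + 1 = ((i + 1 : Nat) : Int) by push_cast; omega]
      rw [PySem.List.pyGet?_natCast, PySem.List.pyGet?_natCast]
      rw [show ((i + k + 1 : Nat) : Int) = ((i + 1 : Nat) : Int) + ((k : Nat) : Int) by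
        push_cast; omega]
      rw [ih k (by omega) (i + 1) (by omega)]
      -- the slice decomposed from the front
      have hslen : ((array.drop i).take (k + 2)).length = k + 2 := by
        simp; omega
      rw [pvG_step ((array.drop i).take (k + 2)) (by rw [hslen]; omega)]
      congr 1
      · -- last element
        rw [pvHeadD, List.head?_reverse, List.getLast?_eq_getElem?, hslen]
        rw [show k + 2 - 1 = k + 1 by omega]
        rw [List.getElem?_take_of_lt (by omega), List.getElem?_drop]
        rw [show i + (k + 1) = i + k + 1 by omega, List.getElem?_eq_getElem h1]
      congr 1
      · -- first element
        have hd : array.drop i = array[i] :: array.drop (i + 1) := List.drop_eq_getElem_cons hi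
        rw [hd, List.take_succ_cons, List.headD_cons, List.getElem?_eq_getElem hi]
        simp
      · -- middle slice
        have ht : ((array.drop i).take (k + 2)).tail = (array.drop (i + 1)).take (k + 1) := by
          rw [← List.drop_one, List.drop_take, List.drop_drop]
          congr 1
        rw [ht, List.dropLast_eq_take]
        simp only [List.length_take, List.length_drop]
        rw [List.take_take]
        rw [show min (min (k + 1) (array.length - (i + 1)) - 1) (k + 1) = k by omega]

-- ===== VERDICT (by name: the statement is the Claim_ definition above) =====
theorem re_sorting_spec : Claim_equal_re_sorting := by
  intro array _
  unfold Spec_re_sorting re_sorting re_sorting_alt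
  have h := pvA_slice array array.length 0 (by simp)
  simpa [pvG, pvF] using h
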